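-- pv_equiv track=rewrite | github.com/blaz-r/gesture_lstm | dai_utils.py | find_isp_scale_params
-- ===== SOURCE A (Python) =====
-- from math import gcd
--
-- def find_isp_scale_params(size, resolution, is_height=True):
--     """
--     Find closest valid size close to 'size' and and the corresponding parameters to setIspScale()
--     This function is useful to work around a bug in depthai where ImageManip is scrambling images that have an invalid size
--     resolution: sensor resolution (width, height)
--     is_height : boolean that indicates if the value 'size' represents the height or the width of the image
--     Returns: valid size, (numerator, denominator)
--     """
--     # We want size >= 288 (first compatible size > lm_input_size)
--     if size < 288:
--         size = 288
--
--     width, height = resolution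
--
--     # We are looking for the list on integers that are divisible by 16 and
--     # that can be written like n/d where n <= 16 and d <= 63
--     if is_height:
--         reference = height
--         other = width
--     else:
--         reference = width
--         other = height
--     size_candidates = {}
--     for s in range(288, reference, 16):
--         f = gcd(reference, s)
--         n = s // f
--         d = reference // f
--         if n <= 16 and d <= 63 and int(round(other * n / d) % 2 == 0):
--             size_candidates[s] = (n, d)
--
--     # What is the candidate size closer to 'size' ?
--     min_dist = -1
--     for s in size_candidates:
--         dist = abs(size - s)
--         if min_dist == -1:
--             min_dist = dist
--             candidate = s
--         else:
--             if dist > min_dist: break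
--             candidate = s
--             min_dist = dist
--     return candidate, size_candidates[candidate]
-- ===== SOURCE B (Python) =====
-- from math import gcd
--
-- def find_isp_scale_params(size, resolution, is_height=True):
--     """Single fused pass: scan candidate sizes once, keeping the running best
--     (ties at equal distance go to the later, larger size, as in the original).
--     The float test int(round(other*n/d) % 2 == 0) is replaced by exact integer
--     rounding (round-half-to-even), which agrees with the float version on this
--     domain (|other*n| <= 2**35, d <= 63: double rounding never crosses a
--     half-integer boundary)."""
--     target = size if size > 288 else 288
--     width, height = resolution
--     reference, other = (height, width) if is_height else (width, height)
--     best = None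
--     for s in range(288, reference, 16):
--         f = gcd(reference, s)
--         n = s // f
--         d = reference // f
--         if n <= 16 and d <= 63:
--             q = other * n
--             r = q % d
--             if 2 * r == d:
--                 even = True  # exact .5: banker's rounding picks the even neighbour
--             else:
--                 m = q // d + (1 if 2 * r > d else 0)
--                 even = m % 2 == 0
--             if even:
--                 dist = abs(target - s)
--                 if best is None or dist <= best[0]:
--                     best = (dist, s, n, d)
--     _, s, n, d = best
--     return s, (n, d)
-- ===== Notes on version B (the rewrite author's own statement) =====
-- stated objective: alternative
-- what changed: A builds a dict of all valid candidate sizes and then scans it with a -1 sentinel and an early break; B fuses everything into one pass that keeps a running best (dist, s, n, d) with ties going to the later size, and replaces the float test int(round(other*n/d) % 2 == 0) by exact integer round-half-to-even.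
import Mathlib
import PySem

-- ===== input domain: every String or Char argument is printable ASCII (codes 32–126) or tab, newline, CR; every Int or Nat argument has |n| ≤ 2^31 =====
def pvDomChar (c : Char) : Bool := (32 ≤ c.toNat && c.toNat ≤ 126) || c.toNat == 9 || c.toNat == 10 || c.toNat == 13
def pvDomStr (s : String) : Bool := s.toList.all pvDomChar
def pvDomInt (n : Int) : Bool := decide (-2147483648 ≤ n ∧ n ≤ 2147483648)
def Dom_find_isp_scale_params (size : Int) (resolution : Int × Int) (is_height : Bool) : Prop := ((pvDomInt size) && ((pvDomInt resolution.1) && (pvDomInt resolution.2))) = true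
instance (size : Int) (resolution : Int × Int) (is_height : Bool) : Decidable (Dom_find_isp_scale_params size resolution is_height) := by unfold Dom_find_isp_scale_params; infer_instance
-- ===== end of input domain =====

-- B fuses A's two phases (build a dict of valid candidates, then scan it with a break) into one
-- pass that keeps a running best; equivalence of the return values is proved (A raises on
-- empty-candidate inputs, excluded by Pre_; B raises there too).

-- ===== PORT A =====
-- exact integer port of Python's round(q / d) for 0 < d on this domain (|q| ≤ 2^35, d ≤ 63:
-- the float quotient never crosses a half-integer boundary, and an exact .5 is represented
-- exactly, so round-half-to-even on the rational q/d is exact)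
def pyRoundDiv (q d : Int) : Int :=
  let a := PySem.Int.floordiv q d
  let r := PySem.Int.mod q d
  if 2 * r < d then a else if d < 2 * r then a + 1 else if a % 2 = 0 then a else a + 1

-- loop body of A's candidate-building loop
def aStep (reference other : Int) (dct : PySem.Dict Int (Int × Int)) (s : Int) : PySem.Dict Int (Int × Int) :=
  let f : Int := (Int.gcd reference s : Int)
  let n := PySem.Int.floordiv s f
  let d := PySem.Int.floordiv reference f
  if n ≤ 16 ∧ d ≤ 63 ∧ pyRoundDiv (other * n) d % 2 = 0 then dct.insert s (n, d) else dct

-- A's second loop: min_dist = -1 sentinel, break on dist > min_dist; none = 'candidate' unbound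
def loopA (size : Int) : List Int → Int → Option Int → Option Int
  | [], _, cand => cand
  | s :: rest, minDist, cand =>
    let dist := |size - s|
    if minDist = -1 then loopA size rest dist (some s)
    else if minDist < dist then cand
    else loopA size rest dist (some s)

def find_isp_scale_params (size : Int) (resolution : Int × Int) (is_height : Bool) : Int × (Int × Int) :=
  let size := if size < 288 then (288 : Int) else size
  let reference := if is_height then resolution.2 else resolution.1
  let other := if is_height then resolution.1 else resolution.2
  let cands := (PySem.List.pyRange 288 reference 16).foldl (aStep reference other) PySem.Dict.empty
  match loopA size cands.keys (-1) none with
  | some c => (c, cands.getD c (0, 0))   -- size_candidates[candidate]; key present under Pre_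
  | none => (0, (0, 0))                  -- Python raises UnboundLocalError here (outside Pre_)

-- ===== PORT B =====
-- loop body of B's single fused pass (Source B): validity test with exact integer rounding,
-- then running best (dist, s, n, d), ties at equal dist going to the later s
def bStep (target reference other : Int) (best : Option (Int × Int × Int × Int)) (s : Int) : Option (Int × Int × Int × Int) :=
  let f : Int := (Int.gcd reference s : Int)
  let n := PySem.Int.floordiv s f
  let d := PySem.Int.floordiv reference f
  if n ≤ 16 ∧ d ≤ 63 then
    let q := other * n
    let r := PySem.Int.mod q d
    let even := if 2 * r = d then true
                else decide ((PySem.Int.floordiv q d + if d < 2 * r then 1 else 0) % 2 = 0)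
    if even then
      let dist := |target - s|
      match best with
      | none => some (dist, s, n, d)
      | some b => if dist ≤ b.1 then some (dist, s, n, d) else some b
    else best
  else best

def find_isp_scale_params_alt (size : Int) (resolution : Int × Int) (is_height : Bool) : Int × (Int × Int) :=
  let target := if 288 < size then size else (288 : Int)
  let reference := if is_height then resolution.2 else resolution.1
  let other := if is_height then resolution.1 else resolution.2
  match (PySem.List.pyRange 288 reference 16).foldl (bStep target reference other) none with
  | some (_, s, n, d) => (s, (n, d))
  | none => (0, (0, 0))                  -- Source B raises here unpacking None (outside Pre_)

-- ===== PRECONDITION & SPEC =====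
-- Pre_ excludes exactly the inputs with no valid candidate size, on which Python A raises
-- UnboundLocalError ('candidate' never assigned); B raises there too (unpacking None).
def Pre_find_isp_scale_params (size : Int) (resolution : Int × Int) (is_height : Bool) : Prop :=
  ∃ s ∈ PySem.List.pyRange 288 (if is_height then resolution.2 else resolution.1) 16,
    let other := if is_height then resolution.1 else resolution.2
    let reference := if is_height then resolution.2 else resolution.1
    let f : Int := (Int.gcd reference s : Int)
    let n := PySem.Int.floordiv s f
    let d := PySem.Int.floordiv reference f
    n ≤ 16 ∧ d ≤ 63 ∧ pyRoundDiv (other * n) d % 2 = 0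
instance (size : Int) (resolution : Int × Int) (is_height : Bool) : Decidable (Pre_find_isp_scale_params size resolution is_height) := by unfold Pre_find_isp_scale_params; infer_instance

def pvWitness_find_isp_scale_params : Int × (Int × Int) × Bool := (300, (640, 480), true)

def Spec_find_isp_scale_params (size : Int) (resolution : Int × Int) (is_height : Bool) (out : Int × (Int × Int)) : Prop := out = find_isp_scale_params_alt size resolution is_height
instance (size : Int) (resolution : Int × Int) (is_height : Bool) (out : Int × (Int × Int)) : Decidable (Spec_find_isp_scale_params size resolution is_height out) := by unfold Spec_find_isp_scale_params; infer_instance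

-- ===== CLAIM (what is proved, stated in full; the proofs are below) =====
def Claim_equal_find_isp_scale_params : Prop := ∀ (size : Int) (resolution : Int × Int) (is_height : Bool), Dom_find_isp_scale_params size resolution is_height → Pre_find_isp_scale_params size resolution is_height → Spec_find_isp_scale_params size resolution is_height (find_isp_scale_params size resolution is_height)

-- ===== LEMMAS AND PROOFS =====

-- the (n, d) pair both programs compute for a candidate s
def nF (r0 s : Int) : Int := PySem.Int.floordiv s (Int.gcd r0 s)
def dF (r0 s : Int) : Int := PySem.Int.floordiv r0 (Int.gcd r0 s)

-- the shared validity test, as a Bool filter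
def validB (r0 o s : Int) : Bool := decide (nF r0 s ≤ 16 ∧ dF r0 s ≤ 63 ∧ pyRoundDiv (o * nF r0 s) (dF r0 s) % 2 = 0)

-- last-argmin scan both loops are proved equal to
def sfold (t : Int) : List Int → Option Int → Option Int
  | [], acc => acc
  | s :: rest, acc =>
    sfold t rest (match acc with
      | none => some s
      | some b => if |t - s| ≤ |t - b| then some s else some b)

theorem clamp_eq (size : Int) : (if size < 288 then (288 : Int) else size) = (if 288 < size then size else 288) := by
  split_ifs <;> omega

theorem dF_pos {r0 : Int} (h : 0 < r0) (s : Int) : 0 < dF r0 s := by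
  have hg : 0 < ((Int.gcd r0 s : Nat) : Int) := by
    have : r0.gcd s ≠ 0 := by
      simp [Int.gcd_eq_zero_iff]
      intro h'; omega
    omega
  have hle : ((Int.gcd r0 s : Nat) : Int) ≤ r0 :=
    Int.le_of_dvd h (Int.gcd_dvd_left r0 s)
  have := (PySem.Int.le_floordiv_iff_mul_le (a := r0) (q := 1) hg).2 (by omega)
  unfold dF; omega

theorem even_equiv (q d : Int) (hd : 0 < d) :
    (if 2 * PySem.Int.mod q d = d then true
     else decide ((PySem.Int.floordiv q d + if d < 2 * PySem.Int.mod q d then 1 else 0) % 2 = 0))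
    = decide (pyRoundDiv q d % 2 = 0) := by
  unfold pyRoundDiv
  rw [PySem.Int.floordiv_eq_ediv_of_pos hd, PySem.Int.mod_eq_emod_of_pos hd]
  have h1 := Int.emod_nonneg q (by omega : d ≠ 0)
  have h2 := Int.emod_lt_of_pos q hd
  split_ifs <;> simp <;> omega

theorem aStep_eq (r0 o : Int) :
    aStep r0 o = (fun dct s => if validB r0 o s then dct.insert s (nF r0 s, dF r0 s) else dct) := by
  funext dct s
  simp only [aStep, validB, nF, dF, decide_eq_true_eq]

theorem bStep_eq (t r0 o : Int) (h : 0 < r0) :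
    bStep t r0 o = (fun best s =>
      if validB r0 o s then
        match best with
        | none => some (|t - s|, s, nF r0 s, dF r0 s)
        | some b => if |t - s| ≤ b.1 then some (|t - s|, s, nF r0 s, dF r0 s) else some b
      else best) := by
  funext best s
  have hd : 0 < PySem.Int.floordiv r0 (Int.gcd r0 s) := by
    have := dF_pos h s; simpa [dF] using this
  simp only [bStep, validB, nF, dF, decide_eq_true_eq]
  rw [even_equiv _ _ hd]
  simp only [decide_eq_true_eq]
  split_ifs <;> simp_all

theorem pairwise_pyRange16 (a b : Int) : (PySem.List.pyRange a b 16).Pairwise (· < ·) := by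
  rw [PySem.List.pyRange_of_pos a b (by norm_num)]
  exact List.Pairwise.map _ (by intro x y hxy; omega) List.pairwise_lt_range

-- A's scan with break equals the full last-argmin scan on a strictly increasing list
theorem sfold_keep (t b : Int) : ∀ (l : List Int), (∀ x ∈ l, |t - b| < |t - x|) →
    sfold t l (some b) = some b := by
  intro l
  induction l with
  | nil => intro _; rfl
  | cons s rest ih =>
    intro hall
    have hs := hall s (by simp)
    simp only [sfold]
    rw [if_neg (not_le.mpr hs)]
    exact ih (fun x hx => hall x (by simp [hx]))

theorem loopA_eq_sfold (t : Int) : ∀ (l : List Int) (p : Int), (p :: l).Pairwise (· < ·) →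
    loopA t l |t - p| (some p) = sfold t l (some p) := by
  intro l
  induction l with
  | nil => intro p _; rfl
  | cons s rest ih =>
    intro p hpw
    have hps : p < s := (List.pairwise_cons.1 hpw).1 s (by simp)
    have habs : 0 ≤ |t - p| := abs_nonneg _
    by_cases hbr : |t - p| < |t - s|
    · -- A breaks; B keeps p through the whole tail
      have hts : t < s := by
        rcases abs_cases (t - p) with ⟨h1, _⟩ | ⟨h1, _⟩ <;>
          rcases abs_cases (t - s) with ⟨h2, _⟩ | ⟨h2, _⟩ <;> omega
      simp only [loopA, sfold, if_neg (by omega : ¬ |t - p| = -1), if_pos hbr,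
        if_neg (by omega : ¬ |t - s| ≤ |t - p|)]
      refine (sfold_keep t p rest ?_).symm
      intro x hx
      have hsx : s < x := (List.pairwise_cons.1 (List.pairwise_cons.1 hpw).2).1 x hx
      have h2 : |t - s| = s - t := by rcases abs_cases (t - s) with ⟨h2, _⟩ | ⟨h2, _⟩ <;> omega
      have h3 : |t - x| = x - t := by rcases abs_cases (t - x) with ⟨h3, _⟩ | ⟨h3, _⟩ <;> omega
      omega
    · -- both advance to s
      simp only [loopA, sfold, if_neg (by omega : ¬ |t - p| = -1), if_neg hbr,
        if_pos (by omega : |t - s| ≤ |t - p|)]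
      exact ih s (List.pairwise_cons.1 hpw).2

theorem loopA_init (t : Int) (l : List Int) : l.Pairwise (· < ·) →
    loopA t l (-1) none = sfold t l none := by
  cases l with
  | nil => intro _; rfl
  | cons h rest =>
    intro hpw
    simp only [loopA, sfold]
    exact loopA_eq_sfold t rest h hpw

-- B's fold carries (|t - b|, b, nF b, dF b) exactly where sfold carries b
def relB (t r0 : Int) (acc : Option (Int × Int × Int × Int)) (accS : Option Int) : Prop :=
  match accS with
  | none => acc = none
  | some b => acc = some (|t - b|, b, nF r0 b, dF r0 b)

theorem foldB_eq_sfold (t r0 o : Int) : ∀ (l : List Int) (acc : Option (Int × Int × Int × Int)) (accS : Option Int),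
    relB t r0 acc accS →
    relB t r0 (l.foldl (fun best s =>
      if validB r0 o s then
        match best with
        | none => some (|t - s|, s, nF r0 s, dF r0 s)
        | some b => if |t - s| ≤ b.1 then some (|t - s|, s, nF r0 s, dF r0 s) else some b
      else best) acc) (sfold t (l.filter (validB r0 o)) accS) := by
  intro l
  induction l with
  | nil => intro acc accS h; simpa using h
  | cons s rest ih =>
    intro acc accS h
    rw [List.foldl_cons, List.filter_cons]
    by_cases hv : validB r0 o s = true
    · simp only [if_pos hv, sfold]
      apply ih
      cases accS with
      | none =>
        simp only [relB] at h
        rw [h]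
        rfl
      | some b =>
        simp only [relB] at h
        rw [h]
        simp only [relB]
        split_ifs <;> rfl
    · simp only [if_neg hv]
      exact ih acc accS h

theorem sfold_mem_aux (t : Int) : ∀ (l : List Int) (acc : Option Int) (c : Int),
    sfold t l acc = some c → c ∈ l ∨ acc = some c := by
  intro l
  induction l with
  | nil => intro acc c h; exact Or.inr h
  | cons s rest ih =>
    intro acc c h
    simp only [sfold] at h
    rcases ih _ _ h with hm | hacc
    · exact Or.inl (List.mem_cons_of_mem _ hm)
    · cases acc with
      | none =>
        simp only at hacc
        exact Or.inl (by simp [← Option.some_inj.1 hacc])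
      | some b =>
        simp only at hacc
        split_ifs at hacc with hle
        · exact Or.inl (by simp [← Option.some_inj.1 hacc])
        · exact Or.inr hacc

theorem sfold_mem (t : Int) (l : List Int) (c : Int) (h : sfold t l none = some c) : c ∈ l := by
  rcases sfold_mem_aux t l none c h with hm | hacc
  · exact hm
  · exact absurd hacc (by simp)

-- ===== VERDICT (by name: the statement is the Claim_ definition above) =====
theorem find_isp_scale_params_spec : Claim_equal_find_isp_scale_params := by
  intro size res is_height _ hpre
  simp only [Spec_find_isp_scale_params, find_isp_scale_params, find_isp_scale_params_alt]
  obtain ⟨s0, hs0mem, -⟩ := hpre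
  set r0 := if is_height then res.2 else res.1 with hr0
  set o := if is_height then res.1 else res.2 with ho
  have h0 : 0 < r0 := by
    have := (PySem.List.mem_pyRange_iff_of_pos (by norm_num) s0).1 hs0mem
    omega
  rw [clamp_eq]
  set t := if 288 < size then size else (288 : Int) with ht
  rw [aStep_eq r0 o, bStep_eq t r0 o h0, ← List.foldl_filter]
  set L := (PySem.List.pyRange 288 r0 16).filter (validB r0 o) with hL
  have hpw : L.Pairwise (· < ·) := (pairwise_pyRange16 288 r0).filter _
  have hnd : L.Nodup := hpw.imp ne_of_lt
  have hitems : ((L.foldl (fun dct s => dct.insert s (nF r0 s, dF r0 s)) PySem.Dict.empty).items)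
      = L.map (fun s => (s, (nF r0 s, dF r0 s))) := by
    have := PySem.Dict.items_foldl_insert_fresh L (fun a => a) (fun s => (nF r0 s, dF r0 s))
      PySem.Dict.empty (by intro a _; simp) (by simpa using hnd)
    simpa using this
  have hkeys : (L.foldl (fun dct s => dct.insert s (nF r0 s, dF r0 s)) PySem.Dict.empty).keys = L := by
    simp only [PySem.Dict.keys, hitems, List.map_map]
    exact List.map_id'' (fun _ => rfl) L
  rw [hkeys, loopA_init t L hpw]
  have hB := foldB_eq_sfold t r0 o (PySem.List.pyRange 288 r0 16) none none (by simp [relB])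
  rw [← hL] at hB
  cases hsf : sfold t L none with
  | none =>
    rw [hsf] at hB
    simp only [relB] at hB
    rw [hB]
  | some c =>
    rw [hsf] at hB
    simp only [relB] at hB
    rw [hB]
    show (c, (L.foldl (fun dct s => dct.insert s (nF r0 s, dF r0 s)) PySem.Dict.empty).getD c (0, 0))
      = (c, (nF r0 c, dF r0 c))
    have hc : c ∈ L := sfold_mem t L c hsf
    have hmem : (c, (nF r0 c, dF r0 c)) ∈
        ((L.foldl (fun dct s => dct.insert s (nF r0 s, dF r0 s)) PySem.Dict.empty).items) := by
      rw [hitems]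
      exact List.mem_map_of_mem hc
    have hknd : (L.foldl (fun dct s => dct.insert s (nF r0 s, dF r0 s)) PySem.Dict.empty).keys.Nodup := by
      rw [hkeys]; exact hnd
    rw [PySem.Dict.getD_of_mem_items _ hmem hknd]
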